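-- pv_equiv track=rewrite | github.com/Bakuutin/inf_sequence | inf_sequence.py | num_of_crosses
-- ===== SOURCE A (Python) =====
-- def num_of_crosses(str):
--     """
--     Возвращает количество 'x' в начале или конце строки
--     """
--     num = 0
--     for char in str:
--         if char == 'x':
--             num += 1
--         else:
--             break
--     for char in str[::-1]:
--         if char == 'x':
--             num += 1
--         else:
--             break
--     return num
-- ===== SOURCE B (Python) =====
-- def num_of_crosses(str):
--     """
--     Возвращает количество 'x' в начале или конце строки
--     """
--     nonx = [i for i, c in enumerate(str) if c != 'x']
--     if not nonx:
--         return 2 * len(str)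
--     return nonx[0] + (len(str) - 1 - nonx[-1])
-- ===== Notes on version B (the rewrite author's own statement) =====
-- stated objective: alternative
-- what changed: Instead of two break-loops counting matches from each end, B builds the list of indices of the non-matching characters in one pass and computes the answer arithmetically from its first and last element (doubling the length when every character matches, which reproduces A's double count there).
import Mathlib
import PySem

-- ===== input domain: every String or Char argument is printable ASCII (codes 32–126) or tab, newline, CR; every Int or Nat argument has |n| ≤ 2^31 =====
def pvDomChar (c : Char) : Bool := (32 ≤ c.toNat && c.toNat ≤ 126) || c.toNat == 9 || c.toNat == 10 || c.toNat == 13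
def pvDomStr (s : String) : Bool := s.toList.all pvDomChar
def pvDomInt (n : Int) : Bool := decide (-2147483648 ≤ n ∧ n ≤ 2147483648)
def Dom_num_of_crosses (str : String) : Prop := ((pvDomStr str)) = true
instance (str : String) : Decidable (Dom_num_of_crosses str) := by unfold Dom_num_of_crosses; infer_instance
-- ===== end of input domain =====

-- B replaces A's two break-loops with one pass collecting the indices of non-'x' characters
-- and an arithmetic formula on the first and last such index (objective: alternative).

-- ===== PORT A =====
-- A's break-loop: count chars equal to 'x' until the first non-'x' (then break).
def pvLoopCount : List Char → Int
  | [] => 0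
  | c :: rest => if c == 'x' then 1 + pvLoopCount rest else 0

def num_of_crosses (str : String) : Int :=
  pvLoopCount str.toList + pvLoopCount str.toList.reverse

-- ===== PORT B =====
-- nonx = [i for i, c in enumerate(str) if c != 'x']
def num_of_crosses_alt (str : String) : Int :=
  let l := str.toList
  let nonx : List Nat := ((l.zipIdx).filter (fun p => !(p.1 == 'x'))).map (fun p => p.2)
  match nonx.head?, nonx.getLast? with
  | some f, some g => (f : Int) + ((l.length : Int) - 1 - (g : Int))
  | _, _ => 2 * (l.length : Int)

-- ===== PRECONDITION & SPEC =====
def Spec_num_of_crosses (str : String) (out : Int) : Prop := out = num_of_crosses_alt str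
instance (str : String) (out : Int) : Decidable (Spec_num_of_crosses str out) := by unfold Spec_num_of_crosses; infer_instance

-- ===== CLAIM (what is proved, stated in full; the proofs are below) =====
def Claim_equal_num_of_crosses : Prop := ∀ (str : String), Dom_num_of_crosses str → Spec_num_of_crosses str (num_of_crosses str)

-- ===== LEMMAS AND PROOFS =====

def pvIdx (l : List Char) (k : Nat) : List Nat :=
  ((l.zipIdx k).filter (fun p => !(p.1 == 'x'))).map (fun p => p.2)

theorem pvLoopCount_eq_takeWhile (l : List Char) :
    pvLoopCount l = ((l.takeWhile (· == 'x')).length : Int) := by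
  induction l with
  | nil => simp [pvLoopCount]
  | cons c rest ih =>
    by_cases h : c == 'x'
    · simp [pvLoopCount, List.takeWhile, h, ih]; ring
    · simp [pvLoopCount, List.takeWhile, h]

theorem pvIdx_cons (c : Char) (l : List Char) (k : Nat) :
    pvIdx (c :: l) k = if c == 'x' then pvIdx l (k + 1) else k :: pvIdx l (k + 1) := by
  by_cases h : c == 'x' <;> simp [pvIdx, List.zipIdx_cons, h]

theorem pvIdx_head (l : List Char) (k : Nat) :
    (pvIdx l k).head? =
      if l.all (· == 'x') then none else some (k + (l.takeWhile (· == 'x')).length) := by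
  induction l generalizing k with
  | nil => simp [pvIdx]
  | cons c rest ih =>
    by_cases h : c == 'x'
    · rw [pvIdx_cons]
      simp only [h, if_true]
      rw [ih]
      by_cases ha : rest.all (· == 'x') <;>
        simp [List.all_cons, h, ha, List.takeWhile, Nat.add_assoc, Nat.add_comm 1]
    · rw [pvIdx_cons]
      simp [h, List.all_cons, List.takeWhile]

theorem pvIdx_append_one (l : List Char) (c : Char) (k : Nat) :
    pvIdx (l ++ [c]) k = pvIdx l k ++ (if c == 'x' then [] else [k + l.length]) := by
  by_cases h : c == 'x' <;> simp [pvIdx, List.zipIdx_append, List.filter_append, h]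

theorem pvIdx_last (l : List Char) (k : Nat) :
    (pvIdx l k).getLast? =
      if l.all (· == 'x') then none
      else some (k + l.length - 1 - (l.reverse.takeWhile (· == 'x')).length) := by
  induction l using List.reverseRecOn generalizing k with
  | nil => simp [pvIdx]
  | append_singleton l c ih =>
    rw [pvIdx_append_one]
    by_cases h : c == 'x'
    · simp only [h, if_true, List.append_nil]
      rw [ih]
      by_cases ha : l.all (· == 'x')
      · simp [ha, h]
      · have hne : l ≠ [] := by rintro rfl; simp at ha
        have hlen : (l.reverse.takeWhile (· == 'x')).length < l.length := by
          have h1 : (l.reverse.takeWhile (· == 'x')).length ≤ l.reverse.length :=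
            l.reverse.takeWhile_sublist _ |>.length_le
          rcases Nat.lt_or_ge (l.reverse.takeWhile (· == 'x')).length l.reverse.length with h2 | h2
          · simpa using h2
          · exfalso
            have : l.reverse.takeWhile (· == 'x') = l.reverse :=
              List.Sublist.eq_of_length (l.reverse.takeWhile_sublist _) (le_antisymm h1 h2)
            have := (List.takeWhile_eq_self_iff).mp this
            exact ha (by simpa using this)
        simp only [ha, h, List.all_append, List.all_cons, List.all_nil,
          Bool.and_true, Bool.and_self]
        simp only [List.reverse_append, List.reverse_cons, List.reverse_nil,
          List.nil_append, List.singleton_append, List.takeWhile, h, List.length_cons,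
          List.length_append]
        simp only [Bool.false_eq_true, if_false, Option.some.injEq, List.length_nil]
        omega
    · simp [h, List.getLast?_append, List.reverse_append, List.all_append]

theorem takeWhile_of_all (l : List Char) (h : l.all (· == 'x')) :
    (l.takeWhile (· == 'x')).length = l.length := by
  rw [List.takeWhile_eq_self_iff.mpr (by simpa [List.all_eq_true] using h)]

theorem pvFinalArith (l : List Char)
    (h2 : (List.takeWhile (fun x => x == 'x') l.reverse).length < l.length) :
    ((List.takeWhile (fun x => x == 'x') l).length : Int)
      + ((List.takeWhile (fun x => x == 'x') l.reverse).length : Int)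
    = ((0 + (List.takeWhile (fun x => x == 'x') l).length : Nat) : Int)
      + ((l.length : Int) - 1
        - ((0 + l.length - 1 - (List.takeWhile (fun x => x == 'x') l.reverse).length : Nat) : Int)) := by
  omega

theorem alt_eq (str : String) :
    num_of_crosses_alt str =
      (match (pvIdx str.toList 0).head?, (pvIdx str.toList 0).getLast? with
        | some f, some g => (f : Int) + ((str.toList.length : Int) - 1 - (g : Int))
        | _, _ => 2 * (str.toList.length : Int)) := rfl

-- ===== VERDICT (by name: the statement is the Claim_ definition above) =====
theorem num_of_crosses_spec : Claim_equal_num_of_crosses := by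
  intro str _
  unfold Spec_num_of_crosses num_of_crosses
  rw [alt_eq]
  set l := str.toList with hl
  clear_value l
  rw [pvIdx_head, pvIdx_last]
  by_cases ha : l.all (· == 'x')
  · have har : l.reverse.all (· == 'x') := by simpa using ha
    simp only [ha, if_true]
    rw [pvLoopCount_eq_takeWhile, pvLoopCount_eq_takeWhile,
      takeWhile_of_all _ ha, takeWhile_of_all _ har]
    simp; ring
  · have h2 : (l.reverse.takeWhile (· == 'x')).length < l.length := by
      rcases Nat.lt_or_ge (l.reverse.takeWhile (· == 'x')).length l.reverse.length with h2 | h2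
      · simpa using h2
      · exfalso
        have h3 : (l.reverse.takeWhile (· == 'x')).length ≤ l.reverse.length :=
          l.reverse.takeWhile_sublist _ |>.length_le
        have : l.reverse.takeWhile (· == 'x') = l.reverse :=
          List.Sublist.eq_of_length (l.reverse.takeWhile_sublist _) (le_antisymm h3 h2)
        have := (List.takeWhile_eq_self_iff).mp this
        exact ha (by simpa using this)
    simp only [ha, Bool.false_eq_true, if_false]
    rw [pvLoopCount_eq_takeWhile, pvLoopCount_eq_takeWhile]
    exact pvFinalArith l h2
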